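-- pv_equiv track=rewrite | github.com/Pavua/Krab-openclaw | scripts/sync_docs.py | render_commands
-- ===== SOURCE A (Python) =====
-- MARK_COMMANDS_BEGIN = "<!-- BEGIN:auto-commands -->"
--
-- MARK_COMMANDS_END = "<!-- END:auto-commands -->"
--
-- def render_commands(commands: list[str]) -> str:
--     lines = [
--         MARK_COMMANDS_BEGIN,
--         "",
--         f"### Auto-generated handlers ({len(commands)} команд)",
--         "",
--     ]
--     # Компактно по 6 в ряд.
--     row: list[str] = []
--     for name in commands:
--         row.append(f"`!{name}`")
--         if len(row) == 6:
--             lines.append(", ".join(row))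
--             row = []
--     if row:
--         lines.append(", ".join(row))
--     lines.extend(["", MARK_COMMANDS_END])
--     return "\n".join(lines)
-- ===== SOURCE B (Python) =====
-- MARK_COMMANDS_BEGIN = "<!-- BEGIN:auto-commands -->"
--
-- MARK_COMMANDS_END = "<!-- END:auto-commands -->"
--
-- def render_commands(commands: list[str]) -> str:
--     lines = [
--         MARK_COMMANDS_BEGIN,
--         "",
--         f"### Auto-generated handlers ({len(commands)} команд)",
--         "",
--     ]
--     # Stride over chunk start indices and join each 6-element slice directly.
--     for i in range(0, len(commands), 6):
--         lines.append(", ".join(f"`!{name}`" for name in commands[i:i + 6]))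
--     lines.extend(["", MARK_COMMANDS_END])
--     return "\n".join(lines)
-- ===== Notes on version B (the rewrite author's own statement) =====
-- stated objective: simpler
-- what changed: Replaces the streaming row buffer with its len==6 flush and trailing-flush branch by striding over chunk start indices range(0, len, 6) and joining each slice commands[i:i+6] directly.
import Mathlib
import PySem

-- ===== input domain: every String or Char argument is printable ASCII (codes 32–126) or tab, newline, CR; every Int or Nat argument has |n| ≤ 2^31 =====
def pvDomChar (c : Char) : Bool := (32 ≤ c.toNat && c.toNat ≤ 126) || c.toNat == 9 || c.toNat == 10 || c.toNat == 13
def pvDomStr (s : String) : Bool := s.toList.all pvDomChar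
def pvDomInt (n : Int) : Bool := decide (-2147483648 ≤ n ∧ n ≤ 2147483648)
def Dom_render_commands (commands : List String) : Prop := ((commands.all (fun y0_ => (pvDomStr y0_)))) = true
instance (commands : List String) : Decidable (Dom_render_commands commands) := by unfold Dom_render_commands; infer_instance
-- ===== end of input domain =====

-- B replaces A's streaming row buffer (len==6 flush + trailing flush) by slicing off
-- successive 6-element chunks; objective: simpler.

def MARK_COMMANDS_BEGIN : String := "<!-- BEGIN:auto-commands -->"
def MARK_COMMANDS_END : String := "<!-- END:auto-commands -->"

-- ===== PORT A =====
def render_commands (commands : List String) : String :=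
  let lines : List String :=
    [MARK_COMMANDS_BEGIN, "",
     "### Auto-generated handlers (" ++ PySem.Int.toStr (commands.length : Int) ++ " команд)",
     ""]
  let p : List String × List String :=
    commands.foldl (fun (p : List String × List String) name =>
      let row := p.2 ++ ["`!" ++ name ++ "`"]
      if row.length = 6 then (p.1 ++ [PySem.Str.join ", " row], ([] : List String))
      else (p.1, row)) (lines, [])
  let lines := if p.2 ≠ [] then p.1 ++ [PySem.Str.join ", " p.2] else p.1
  PySem.Str.join "\n" (lines ++ ["", MARK_COMMANDS_END])

-- ===== PORT B =====
def render_commands_alt (commands : List String) : String :=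
  let lines : List String :=
    [MARK_COMMANDS_BEGIN, "",
     "### Auto-generated handlers (" ++ PySem.Int.toStr (commands.length : Int) ++ " команд)",
     ""]
  let lines :=
    (PySem.List.pyRange 0 (commands.length : Int) 6).foldl (fun acc i =>
      acc ++ [PySem.Str.join ", "
        ((PySem.List.slice commands (some i) (some (i + 6))).map
          (fun name => "`!" ++ name ++ "`"))]) lines
  PySem.Str.join "\n" (lines ++ ["", MARK_COMMANDS_END])

-- ===== PRECONDITION & SPEC =====
def Spec_render_commands (commands : List String) (out : String) : Prop := out = render_commands_alt commands
instance (commands : List String) (out : String) : Decidable (Spec_render_commands commands out) := by unfold Spec_render_commands; infer_instance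

-- ===== CLAIM (what is proved, stated in full; the proofs are below) =====
def Claim_equal_render_commands : Prop := ∀ (commands : List String), Dom_render_commands commands → Spec_render_commands commands (render_commands commands)

-- ===== LEMMAS AND PROOFS =====

-- proof helper: the rows produced from an already-formatted item list, in 6-chunks
def pvChunk (zs : List String) : List String :=
  if h : zs = [] then []
  else PySem.Str.join ", " (zs.take 6) :: pvChunk (zs.drop 6)
termination_by zs.length
decreasing_by
  have : zs.length ≠ 0 := by simpa using h
  simp; omega

lemma pvChunk_nil : pvChunk [] = [] := by
  unfold pvChunk; simp

lemma pvChunk_cons (zs : List String) (h : zs ≠ []) :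
    pvChunk zs = PySem.Str.join ", " (zs.take 6) :: pvChunk (zs.drop 6) := by
  rw [pvChunk]; simp [h]

-- unfolding lemma for a step-6 range
lemma pyRange6_cons (a b : Int) (h : a < b) :
    PySem.List.pyRange a b 6 = a :: PySem.List.pyRange (a + 6) b 6 := by
  rw [PySem.List.pyRange_of_pos a b (by norm_num), PySem.List.pyRange_of_pos (a + 6) b (by norm_num)]
  rw [if_pos h]
  by_cases h6 : a + 6 < b
  · rw [if_pos h6]
    have hn : ((b - a + 6 - 1) / 6).toNat = ((b - (a + 6) + 6 - 1) / 6).toNat + 1 := by omega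
    rw [hn, List.range_succ_eq_map]
    simp only [List.map_cons, List.map_map, Nat.cast_zero, List.cons.injEq]
    refine ⟨by ring, ?_⟩
    apply List.map_congr_left
    intro k _
    simp only [Function.comp]
    push_cast
    ring
  · rw [if_neg h6]
    have hn : ((b - a + 6 - 1) / 6).toNat = 1 := by omega
    rw [hn]
    simp

lemma pyRange6_nil (a b : Int) (h : b ≤ a) : PySem.List.pyRange a b 6 = [] := by
  rw [PySem.List.pyRange_of_pos a b (by norm_num)]
  rw [if_neg (by omega)]
  simp

-- B's striding fold computes pvChunk of the formatted remainder
lemma strideB (fuel : Nat) : ∀ (xs : List String) (i : Int) (acc : List String),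
    0 ≤ i → ((xs.length : Int) - i).toNat ≤ fuel →
    (PySem.List.pyRange i (xs.length : Int) 6).foldl (fun acc j =>
      acc ++ [PySem.Str.join ", "
        ((PySem.List.slice xs (some j) (some (j + 6))).map
          (fun name => "`!" ++ name ++ "`"))]) acc
    = acc ++ pvChunk ((xs.drop i.toNat).map (fun name => "`!" ++ name ++ "`")) := by
  induction fuel with
  | zero =>
      intro xs i acc hi hf
      have hge : (xs.length : Int) ≤ i := by omega
      rw [pyRange6_nil _ _ hge]
      have : xs.drop i.toNat = [] := List.drop_eq_nil_of_le (by omega)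
      simp [this, pvChunk_nil]
  | succ n ih =>
      intro xs i acc hi hf
      by_cases hlt : i < (xs.length : Int)
      · rw [pyRange6_cons _ _ hlt]
        simp only [List.foldl_cons]
        have hslice : PySem.List.slice xs (some i) (some (i + 6)) = (xs.drop i.toNat).take 6 := by
          rw [PySem.List.slice_toNat xs hi (by omega)]
          congr 1
          omega
        have hne : xs.drop i.toNat ≠ [] := by
          intro hcon
          have := List.drop_eq_nil_iff.mp hcon
          omega
        have hdd : (xs.drop i.toNat).drop 6 = xs.drop (i + 6).toNat := by
          rw [List.drop_drop]
          congr 1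
          omega
        have hchunk : pvChunk ((xs.drop i.toNat).map (fun name => "`!" ++ name ++ "`"))
            = PySem.Str.join ", " (((xs.drop i.toNat).take 6).map (fun name => "`!" ++ name ++ "`"))
              :: pvChunk ((xs.drop (i + 6).toNat).map (fun name => "`!" ++ name ++ "`")) := by
          rw [pvChunk_cons _ (by simpa using hne)]
          rw [← List.map_take, ← List.map_drop, hdd]
        rw [hslice, ih xs (i + 6) _ (by omega) (by omega), hchunk]
        simp
      · rw [pyRange6_nil _ _ (by omega)]
        have : xs.drop i.toNat = [] := List.drop_eq_nil_of_le (by omega)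
        simp [this, pvChunk_nil]

-- A's fold-plus-final-flush computes acc ++ pvChunk (row ++ items), for any row shorter than 6
lemma foldA_eq_chunk (ys : List String) :
    ∀ (acc row : List String), row.length < 6 →
    (let p := ys.foldl (fun (p : List String × List String) z =>
        let row := p.2 ++ [z]
        if row.length = 6 then (p.1 ++ [PySem.Str.join ", " row], ([] : List String))
        else (p.1, row)) (acc, row)
     if p.2 ≠ [] then p.1 ++ [PySem.Str.join ", " p.2] else p.1)
    = acc ++ pvChunk (row ++ ys) := by
  induction ys with
  | nil =>
      intro acc row hrow
      simp only [List.foldl_nil, List.append_nil]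
      by_cases h : row = []
      · simp [h, pvChunk_nil]
      · have ht : row.take 6 = row := List.take_of_length_le (by omega)
        have hd : row.drop 6 = [] := List.drop_eq_nil_of_le (by omega)
        simp [h, pvChunk_cons row h, ht, hd, pvChunk_nil]
  | cons y ys ih =>
      intro acc row hrow
      simp only [List.foldl_cons]
      by_cases h6 : (row ++ [y]).length = 6
      · simp only [h6, if_true, if_pos]
        have hsplit : row ++ y :: ys = (row ++ [y]) ++ ys := by simp
        have ht : ((row ++ [y]) ++ ys).take 6 = row ++ [y] := by
          rw [List.take_append_of_le_length (by omega)]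
          exact List.take_of_length_le (by omega)
        have hd : ((row ++ [y]) ++ ys).drop 6 = ys := by
          rw [List.drop_append_of_le_length (by omega)]
          rw [List.drop_eq_nil_of_le (by omega)]
          simp
        rw [hsplit, pvChunk_cons _ (by simp), ht, hd]
        have hrec := ih (acc ++ [PySem.Str.join ", " (row ++ [y])]) [] (by norm_num)
        simp only [List.nil_append] at hrec
        rw [hrec]
        simp
      · simp only [h6, if_false, if_neg]
        have hlt : (row ++ [y]).length < 6 := by
          simp only [List.length_append, List.length_cons, List.length_nil] at h6 ⊢
          omega
        rw [ih acc (row ++ [y]) hlt]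
        congr 2
        simp

-- ===== VERDICT (by name: the statement is the Claim_ definition above) =====
theorem render_commands_spec : Claim_equal_render_commands := by
  intro commands _
  unfold Spec_render_commands render_commands render_commands_alt
  have hA := foldA_eq_chunk (commands.map (fun name => "`!" ++ name ++ "`"))
    [MARK_COMMANDS_BEGIN, "",
     "### Auto-generated handlers (" ++ PySem.Int.toStr (commands.length : Int) ++ " команд)",
     ""] [] (by norm_num)
  simp only [List.nil_append] at hA
  rw [List.foldl_map] at hA
  have hB := strideB ((commands.length : Int) - 0).toNat commands 0
    [MARK_COMMANDS_BEGIN, "",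
     "### Auto-generated handlers (" ++ PySem.Int.toStr (commands.length : Int) ++ " команд)",
     ""] (by norm_num) (le_refl _)
  simp only [Int.toNat_zero, List.drop_zero] at hB
  simp only []
  rw [hA, hB]
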